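-- pv_equiv track=rewrite | github.com/Kings-Mon/Python-Programs | love_calculater.py | calculate_love
-- ===== SOURCE A (Python) =====
-- def calculate_love(name1, name2):
--     combined_name = (name1 + name2).lower()
--     total = 0
--
--     # Count occurrences of letters in 'true love'
--     true_love = "true love"
--     for letter in true_love:
--         total += combined_name.count(letter)
--
--     # Calculating compatibility score
--     score = total % 101
--
--     return score
-- ===== SOURCE B (Python) =====
-- def calculate_love(name1, name2):
--     # Build a weight table once from the fixed string, then one pass over the names.
--     weights = {}
--     for ch in "true love":
--         weights[ch] = weights.get(ch, 0) + 1
--     total = 0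
--     for ch in (name1 + name2).lower():
--         total += weights.get(ch, 0)
--     return total % 101
-- ===== Notes on version B (the rewrite author's own statement) =====
-- stated objective: alternative
-- what changed: Replaces A's nine repeated full scans of the combined name (one str.count per letter of 'true love') with a weight table built once from 'true love' and a single accumulating pass over the combined name; fewer passes, but CPython's C-level str.count means no measured speedup.
import Mathlib
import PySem

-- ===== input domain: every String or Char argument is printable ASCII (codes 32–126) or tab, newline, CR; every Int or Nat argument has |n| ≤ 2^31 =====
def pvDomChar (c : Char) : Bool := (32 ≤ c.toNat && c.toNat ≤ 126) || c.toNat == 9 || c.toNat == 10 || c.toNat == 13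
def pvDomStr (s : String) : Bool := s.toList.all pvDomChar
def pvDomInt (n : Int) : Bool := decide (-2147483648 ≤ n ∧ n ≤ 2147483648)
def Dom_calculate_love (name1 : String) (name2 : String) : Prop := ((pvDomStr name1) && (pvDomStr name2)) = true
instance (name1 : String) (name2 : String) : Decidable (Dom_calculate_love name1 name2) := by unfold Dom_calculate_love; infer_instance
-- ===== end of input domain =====

-- B replaces A's one full scan of the combined name per letter of "true love" with a weight
-- table built once from "true love" and a single accumulating pass over the combined name.


-- ===== PORT A =====
def calculate_love (name1 : String) (name2 : String) : Int :=
  let combined_name := PySem.Str.lower (name1 ++ name2)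
  let total : Int := 0
  let true_love := "true love"
  let total := true_love.toList.foldl
    (fun total letter => total + (PySem.Str.count combined_name (String.ofList [letter]) : Int)) total
  let score := PySem.Int.mod total 101
  score

-- ===== PORT B =====
def calculate_love_alt (name1 : String) (name2 : String) : Int :=
  let weights := "true love".toList.foldl
    (fun (d : PySem.Dict Char Int) ch => d.insert ch (d.getD ch 0 + 1)) PySem.Dict.empty
  let total : Int := 0
  let total := (PySem.Str.lower (name1 ++ name2)).toList.foldl
    (fun total ch => total + weights.getD ch 0) total
  PySem.Int.mod total 101

-- ===== PRECONDITION & SPEC =====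
def Spec_calculate_love (name1 : String) (name2 : String) (out : Int) : Prop := out = calculate_love_alt name1 name2
instance (name1 : String) (name2 : String) (out : Int) : Decidable (Spec_calculate_love name1 name2 out) := by unfold Spec_calculate_love; infer_instance

-- ===== CLAIM (what is proved, stated in full; the proofs are below) =====
def Claim_equal_calculate_love : Prop := ∀ (name1 : String) (name2 : String), Dom_calculate_love name1 name2 → Spec_calculate_love name1 name2 (calculate_love name1 name2)

-- ===== LEMMAS AND PROOFS =====

-- Python's s.count(sub) for a one-character sub is the character count
lemma chars_count_go_singleton (c : Char) (l : List Char) (fuel : Nat) (acc : Nat)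
    (h : l.length ≤ fuel) :
    PySem.Chars.count.go [c] fuel l acc = acc + l.count c := by
  induction l generalizing fuel acc with
  | nil => cases fuel <;> simp [PySem.Chars.count.go]
  | cons x t ih =>
    cases fuel with
    | zero => simp at h
    | succ n =>
      rw [show PySem.Chars.count.go [c] (n+1) (x :: t) acc
          = if [c].isPrefixOf (x :: t) then PySem.Chars.count.go [c] n (List.drop 1 (x :: t)) (acc+1)
            else PySem.Chars.count.go [c] n t acc from rfl]
      simp only [List.isPrefixOf, Bool.and_true, List.drop_succ_cons, List.drop_zero]
      have h' : t.length ≤ n := by simp at h; omega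
      by_cases hx : c = x
      · subst hx
        rw [if_pos (by simp), ih n (acc+1) h']
        simp [List.count_cons]
        omega
      · rw [if_neg (by simpa using hx), ih n acc h']
        simp [List.count_cons, hx]
        exact fun e => hx e.symm

lemma chars_count_singleton (l : List Char) (c : Char) :
    PySem.Chars.count l [c] = l.count c := by
  simp [PySem.Chars.count, chars_count_go_singleton c l l.length 0 le_rfl]

-- double counting: summing over xs the counts in ys = summing over ys the counts in xs
lemma sum_count_swap (xs ys : List Char) :
    (xs.map (fun c => (ys.count c : Int))).sum = (ys.map (fun c => (xs.count c : Int))).sum := by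
  induction xs with
  | nil => simp
  | cons x t ih =>
    simp only [List.map_cons, List.sum_cons, ih]
    have h1 : (ys.map (fun c => ((x :: t).count c : Int))).sum
        = (ys.map (fun c => (t.count c : Int) + (if x == c then 1 else 0))).sum := by
      congr 1; apply List.map_congr_left; intro c _
      simp only [List.count_cons]
      split_ifs with hc <;> push_cast <;> simp
    have h2 : (ys.map (fun c => if x == c then (1:Int) else 0)).sum = (ys.count x : Int) := by
      rw [PySem.List.sum_map_ite_one_zero (fun c => x == c) ys]
      norm_cast
      rw [List.count]
      exact List.countP_congr (fun a _ => by rw [Bool.eq_iff_iff]; simp [beq_iff_eq]; exact eq_comm)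
    rw [h1, List.sum_map_add, h2]
    omega

-- ===== VERDICT (by name: the statement is the Claim_ definition above) =====
theorem calculate_love_spec : Claim_equal_calculate_love := by
  intro name1 name2 _
  unfold Spec_calculate_love calculate_love calculate_love_alt
  simp only []
  apply congrArg (fun t => PySem.Int.mod t 101)
  set l := (PySem.Str.lower (name1 ++ name2)).toList with hl
  rw [PySem.List.foldl_add, PySem.List.foldl_add]
  have hcnt : ∀ c : Char, (PySem.Str.count (PySem.Str.lower (name1 ++ name2)) (String.ofList [c]) : Int)
      = (l.count c : Int) := by
    intro c
    rw [PySem.Str.count_eq]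
    norm_cast
    have : (String.ofList [c]).toList = [c] := by simp
    rw [this, ← hl]
    exact chars_count_singleton l c
  have hW : ∀ ch : Char, (List.foldl (fun (d : PySem.Dict Char Int) ch => d.insert ch (d.getD ch 0 + 1))
      PySem.Dict.empty "true love".toList).getD ch 0 = ("true love".toList.count ch : Int) := by
    intro ch
    rw [PySem.Dict.getD_foldl_insert_add_one]
    simp [PySem.Dict.empty, PySem.Dict.getD, PySem.Dict.get?]
  rw [List.map_congr_left (fun c _ => hcnt c), List.map_congr_left (fun c _ => hW c)]
  exact congrArg (0 + ·) (sum_count_swap _ l)
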